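-- pv_equiv track=rewrite | github.com/adnanyaqoobvirk/leetcode | 1649-create-sorted-array-through-instructions/1649-create-sorted-array-through-instructions.py | createSortedArray
-- ===== SOURCE A (Python) =====
-- from typing import List
--
-- def createSortedArray(instructions: List[int]) -> int:
--     def update(i):
--         while i < n:
--             bit[i] += 1
--             i += i & -i
--
--     def query(i):
--         res = 0
--         while i > 0:
--             res += bit[i]
--             i -= i & -i
--         return res
--
--     minv, maxv = min(instructions), max(instructions)
--     offset = minv - 1
--     n = maxv - minv + 2
--     bit = [0] * n
--
--     cost = 0
--     for num in instructions:
--         num = num - offset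
--         cost += min(query(num - 1), query(n - 1) - query(num))
--         update(num)
--     return cost % (10**9 + 7)
-- ===== SOURCE B (Python) =====
-- def createSortedArray(instructions):
--     # Counts strictly-smaller / strictly-greater previous elements directly,
--     # instead of A's Fenwick tree over the whole value range.
--     cost = 0
--     seen = []
--     for num in instructions:
--         less = sum(1 for x in seen if x < num)
--         greater = sum(1 for x in seen if x > num)
--         cost += min(less, greater)
--         seen.append(num)
--     return cost % (10**9 + 7)
-- ===== Notes on version B (the rewrite author's own statement) =====
-- stated objective: simpler
-- what changed: replaces A's binary indexed (Fenwick) tree allocated over the whole value range [min,max] by a direct one-pass count of strictly-smaller and strictly-greater previous elements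
import Mathlib
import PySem

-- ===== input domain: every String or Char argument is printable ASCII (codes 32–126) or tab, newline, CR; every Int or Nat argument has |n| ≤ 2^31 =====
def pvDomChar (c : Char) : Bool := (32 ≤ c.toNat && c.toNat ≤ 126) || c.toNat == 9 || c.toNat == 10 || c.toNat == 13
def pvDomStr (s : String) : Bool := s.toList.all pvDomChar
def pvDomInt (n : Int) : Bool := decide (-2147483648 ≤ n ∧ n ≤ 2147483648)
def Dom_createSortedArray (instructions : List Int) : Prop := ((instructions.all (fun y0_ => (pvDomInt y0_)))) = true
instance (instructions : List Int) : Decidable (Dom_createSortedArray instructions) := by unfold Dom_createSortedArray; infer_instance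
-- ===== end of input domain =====

-- B replaces A's Fenwick tree over the value range by a direct count of
-- strictly-smaller / strictly-greater previous elements (simpler, no range-sized array).

-- ===== PORT A =====
-- Python's `i & -i` is PySem.Int.band i (-i).  The two lemmas below are cited by the
-- termination proofs of the two while-loops (`update`, `query`) of A.
theorem pv_band_self_neg (i : Int) (h : 0 < i) :
    PySem.Int.band i (-i) = ((i.toNat - (i.toNat &&& (i.toNat - 1)) : ℕ) : Int) := by
  have h1 : (0:Int) ≤ i := le_of_lt h
  have h2 : ¬ (0:Int) ≤ -i := by omega
  have h3 : (- -i - 1).toNat = i.toNat - 1 := by omega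
  unfold PySem.Int.band
  rw [if_pos h1, if_neg h2, h3]

theorem pv_band_pos (i : Int) (h : 0 < i) : 0 < PySem.Int.band i (-i) := by
  rw [pv_band_self_neg i h]
  have := @Nat.and_le_right i.toNat (i.toNat - 1)
  omega

theorem pv_band_le (i : Int) (h : 0 < i) : PySem.Int.band i (-i) ≤ i := by
  rw [pv_band_self_neg i h]; omega

-- `def update(i): while i < n: bit[i] += 1; i += i & -i`
-- (the `0 < i` part of the guard only makes the recursion total; in A it is invariant)
def pvUpdate (n : Int) (bit : Array Int) (i : Int) : Array Int :=
  if h : 0 < i ∧ i < n then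
    pvUpdate n (bit.modify i.toNat (· + 1)) (i + PySem.Int.band i (-i))
  else bit
termination_by (n - i).toNat
decreasing_by
  have h1 := pv_band_pos i h.1
  have h2 := pv_band_le i h.1
  omega

-- `def query(i): res = 0; while i > 0: res += bit[i]; i -= i & -i; return res`
def pvQuery (bit : Array Int) (i : Int) : Int :=
  if h : 0 < i then bit.getD i.toNat 0 + pvQuery bit (i - PySem.Int.band i (-i)) else 0
termination_by i.toNat
decreasing_by
  have h1 := pv_band_pos i h
  have h2 := pv_band_le i h
  omega

-- the body of A's `for num in instructions` loop
def pvStepA (offset n : Int) (st : Int × Array Int) (num : Int) : Int × Array Int :=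
  let num := num - offset
  (st.1 + min (pvQuery st.2 (num - 1)) (pvQuery st.2 (n - 1) - pvQuery st.2 num),
   pvUpdate n st.2 num)

def createSortedArray (instructions : List Int) : Int :=
  match PySem.List.min? instructions (fun x => x), PySem.List.max? instructions (fun x => x) with
  | some minv, some maxv =>
    let offset := minv - 1
    let n := maxv - minv + 2
    let bit : Array Int := Array.replicate n.toNat 0
    PySem.Int.mod (instructions.foldl (pvStepA offset n) (0, bit)).1 (10 ^ 9 + 7)
  | _, _ => 0   -- unreachable under Pre_ (Python: min()/max() raise ValueError on [])

-- ===== PORT B =====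
-- the body of B's `for num in instructions` loop
def pvStepB (st : Int × List Int) (num : Int) : Int × List Int :=
  (st.1 + min ((st.2.filter (fun x => decide (x < num))).length : Int)
             ((st.2.filter (fun x => decide (num < x))).length : Int),
   st.2 ++ [num])

def createSortedArray_alt (instructions : List Int) : Int :=
  PySem.Int.mod (instructions.foldl pvStepB ((0 : Int), ([] : List Int))).1 (10 ^ 9 + 7)

-- ===== PRECONDITION & SPEC =====
-- Pre_ excludes exactly the empty list, on which A raises ValueError (min of empty sequence).
def Pre_createSortedArray (instructions : List Int) : Prop := instructions ≠ []
instance (instructions : List Int) : Decidable (Pre_createSortedArray instructions) := by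
  unfold Pre_createSortedArray; infer_instance

def pvWitness_createSortedArray : List Int := [2, 1, 3]

def Spec_createSortedArray (instructions : List Int) (out : Int) : Prop := out = createSortedArray_alt instructions
instance (instructions : List Int) (out : Int) : Decidable (Spec_createSortedArray instructions out) := by unfold Spec_createSortedArray; infer_instance

-- ===== CLAIM (what is proved, stated in full; the proofs are below) =====
def Claim_equal_createSortedArray : Prop := ∀ (instructions : List Int), Dom_createSortedArray instructions → Pre_createSortedArray instructions → Spec_createSortedArray instructions (createSortedArray instructions)


-- ===== LEMMAS AND PROOFS =====

-- ---- bit arithmetic: the lowest set bit ----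
def lsbN (m : ℕ) : ℕ := m - (m &&& (m - 1))

theorem pv_tb2 (x i : ℕ) : (2*x).testBit i = (decide (i ≠ 0) && x.testBit (i-1)) := by
  cases i with
  | zero => simp [Nat.testBit_zero]
  | succ k => rw [Nat.testBit_succ]; simp

theorem pv_tb21 (x i : ℕ) : (2*x+1).testBit i = (decide (i = 0) || x.testBit (i-1)) := by
  cases i with
  | zero => simp [Nat.testBit_zero]
  | succ k =>
      rw [Nat.testBit_succ]
      have : (2*x+1)/2 = x := by omega
      simp [this]

theorem pv_land_odd_even (a b : ℕ) : (2*a+1) &&& (2*b) = 2*(a &&& b) := by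
  apply Nat.eq_of_testBit_eq; intro i
  rw [Nat.testBit_land, pv_tb21, pv_tb2, pv_tb2, Nat.testBit_land]
  cases h : (decide (i = 0)) <;> simp_all

theorem lsbN_le (m : ℕ) : lsbN m ≤ m := by unfold lsbN; omega

theorem lsbN_pos (m : ℕ) (h : 0 < m) : 0 < lsbN m := by
  unfold lsbN
  have := @Nat.and_le_right m (m - 1)
  omega

theorem lsbN_odd (m : ℕ) (h : m % 2 = 1) : lsbN m = 1 := by
  obtain ⟨a, rfl⟩ : ∃ a, m = 2*a+1 := ⟨m/2, by omega⟩
  unfold lsbN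
  have h1 : 2*a+1-1 = 2*a := by omega
  rw [h1, pv_land_odd_even a a]
  have : a &&& a = a := Nat.eq_of_testBit_eq (fun i => by simp)
  omega

theorem lsbN_even (a : ℕ) (h : 0 < a) : lsbN (2*a) = 2 * lsbN a := by
  have h1 : 2*a - 1 = 2*(a-1)+1 := by omega
  have h2 : (2*a) &&& (2*(a-1)+1) = 2*((a-1) &&& a) := by
    rw [Nat.land_comm]; exact pv_land_odd_even (a-1) a
  have h3 : (a-1) &&& a ≤ a := Nat.and_le_right
  have h4 : a &&& (a-1) = (a-1) &&& a := Nat.land_comm ..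
  have h5 : a &&& (a-1) ≤ a - 1 := Nat.and_le_right
  unfold lsbN
  rw [h1, h2]
  omega

theorem lsbN_mod (m : ℕ) (h : 0 < m) : m % (2 * lsbN m) = lsbN m := by
  induction m using Nat.strong_induction_on with
  | _ m IH =>
    by_cases hp : m % 2 = 1
    · rw [lsbN_odd m hp]; omega
    · obtain ⟨a, rfl⟩ : ∃ a, m = 2*a := ⟨m/2, by omega⟩
      have ha : 0 < a := by omega
      rw [lsbN_even a ha, show 2*(2*lsbN a) = 2*(2*lsbN a) from rfl]
      rw [Nat.mul_mod_mul_left]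
      rw [IH a (by omega) ha]

theorem sub_lsbN_even (m : ℕ) (h : 0 < m) : (m - lsbN m) % 2 = 0 := by
  have hL := lsbN_mod m h
  have h2 := Nat.div_add_mod m (2 * lsbN m)
  rw [hL, Nat.mul_assoc] at h2
  set t := lsbN m * (m / (2 * lsbN m)) with ht
  have h3 : m - lsbN m = 2 * t := by omega
  rw [h3, Nat.mul_mod_right]

theorem pv_key1 : ∀ i j : ℕ, 0 < j → j + lsbN j ≤ i → i - lsbN i < j + lsbN j → i - lsbN i < j := by
  intro i
  induction i using Nat.strong_induction_on with
  | _ i IH =>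
    intro j hj hle hlt
    have hi : 0 < i := by have := lsbN_pos j hj; omega
    by_cases hjo : j % 2 = 1
    · rw [lsbN_odd j hjo] at hle hlt
      have he := sub_lsbN_even i hi
      have hli := lsbN_le i
      omega
    · obtain ⟨b, rfl⟩ : ∃ b, j = 2*b := ⟨j/2, by omega⟩
      have hb : 0 < b := by omega
      rw [lsbN_even b hb] at hle hlt
      by_cases hio : i % 2 = 1
      · rw [lsbN_odd i hio] at hlt ⊢
        have hlb := lsbN_le b
        omega
      · obtain ⟨a, rfl⟩ : ∃ a, i = 2*a := ⟨i/2, by omega⟩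
        have ha : 0 < a := by omega
        rw [lsbN_even a ha] at hlt ⊢
        have hla := lsbN_le a
        have hlb := lsbN_le b
        have := IH a (by omega) b hb (by omega) (by omega)
        omega

theorem pv_key2 : ∀ i j : ℕ, 0 < j → j < i → i - lsbN i < j → j + lsbN j ≤ i := by
  intro i
  induction i using Nat.strong_induction_on with
  | _ i IH =>
    intro j hj hji hlt
    by_cases hio : i % 2 = 1
    · rw [lsbN_odd i hio] at hlt; omega
    · by_cases hjo : j % 2 = 1
      · rw [lsbN_odd j hjo]; omega
      · obtain ⟨a, rfl⟩ : ∃ a, i = 2*a := ⟨i/2, by omega⟩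
        obtain ⟨b, rfl⟩ : ∃ b, j = 2*b := ⟨j/2, by omega⟩
        have ha : 0 < a := by omega
        have hb : 0 < b := by omega
        rw [lsbN_even a ha] at hlt
        rw [lsbN_even b hb]
        have hla := lsbN_le a
        have := IH a (by omega) b (by omega) (by omega) (by omega)
        omega

theorem band_eq_lsbN (j : Int) (h : 0 < j) :
    PySem.Int.band j (-j) = (lsbN j.toNat : Int) := by
  rw [pv_band_self_neg j h]; rfl

-- ---- counting helpers ----
def cLe (P : List Int) (v : Int) : ℕ := (P.filter (fun x => decide (x ≤ v))).length
def cIoc (P : List Int) (a b : Int) : ℕ := (P.filter (fun x => decide (a < x) && decide (x ≤ b))).length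

theorem cnt_split (P : List Int) (a b : Int) (hab : a ≤ b) :
    cLe P b = cLe P a + cIoc P a b := by
  unfold cLe cIoc
  induction P with
  | nil => simp
  | cons x t ih =>
    simp only [List.filter_cons]
    by_cases h2 : x ≤ a
    · have h1 : x ≤ b := le_trans h2 hab
      have h3 : ¬ a < x := by omega
      simp [h1, h2, h3, ih]
      omega
    · by_cases h1 : x ≤ b
      · have h3 : a < x := by omega
        simp [h1, h2, h3, ih]
        omega
      · simp [h1, h2, ih]

theorem cIoc_append (P : List Int) (j a b : Int) :
    cIoc (P ++ [j]) a b = cIoc P a b + (if a < j ∧ j ≤ b then 1 else 0) := by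
  unfold cIoc
  rw [List.filter_append]
  by_cases h1 : a < j <;> by_cases h2 : j ≤ b <;>
    simp [List.filter, h1, h2]

-- ---- the Fenwick-tree invariant ----
def BitInv (n : Int) (bit : Array Int) (P : List Int) : Prop :=
  bit.size = n.toNat ∧ (∀ x ∈ P, 1 ≤ x ∧ x ≤ n - 1) ∧
  ∀ m : ℕ, 0 < m → m < n.toNat →
    bit.getD m 0 = (cIoc P ((m - lsbN m : ℕ) : Int) (m : Int) : Int)

theorem update_size (n : Int) : ∀ (j : Int) (bit : Array Int), (pvUpdate n bit j).size = bit.size := by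
  intro j bit
  fun_induction pvUpdate with
  | case1 bit i h ih => rw [ih, Array.size_modify]
  | case2 => rfl

theorem modify_getD (bit : Array Int) (t m : ℕ) (ht : t < bit.size) :
    (bit.modify t (· + 1)).getD m 0 = bit.getD m 0 + (if t = m then 1 else 0) := by
  rw [Array.getD_eq_getD_getElem?, Array.getD_eq_getD_getElem?, Array.getElem?_modify]
  by_cases hm : m < bit.size
  · rw [Array.getElem?_eq_getElem hm]
    split_ifs <;> simp
  · have h1 : bit[m]? = none := by
      rw [Array.getElem?_eq_none_iff]; omega
    have h2 : ¬ t = m := by omega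
    simp [h1, h2]

theorem update_getD (n : Int) : ∀ (K : ℕ) (j : Int) (bit : Array Int), (n - j).toNat ≤ K →
    0 < j → bit.size = n.toNat →
    ∀ m : ℕ, m < n.toNat →
    (pvUpdate n bit j).getD m 0 =
      bit.getD m 0 + (if j.toNat ≤ m ∧ m - lsbN m < j.toNat then 1 else 0) := by
  intro K
  induction K with
  | zero =>
    intro j bit hfuel hj hs m hm
    rw [pvUpdate, dif_neg (by omega)]
    rw [if_neg (by omega)]
    omega
  | succ K ih =>
    intro j bit hfuel hj hs m hm
    by_cases hg : 0 < j ∧ j < n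
    · rw [pvUpdate, dif_pos hg]
      have hb := band_eq_lsbN j hj
      have hbp := pv_band_pos j hj
      have hL1 := lsbN_pos j.toNat (by omega)
      have hL2 := lsbN_le j.toNat
      have hrec := ih (j + PySem.Int.band j (-j)) (bit.modify j.toNat (· + 1))
        (by omega) (by omega) (by rw [Array.size_modify]; exact hs) m hm
      rw [hrec]
      have hj' : (j + PySem.Int.band j (-j)).toNat = j.toNat + lsbN j.toNat := by
        rw [hb]; omega
      rw [hj', modify_getD bit j.toNat m (by omega)]
      have hLm1 := lsbN_pos m
      have hLm2 := lsbN_le m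
      by_cases hjm : j.toNat = m
      · subst hjm
        rw [if_pos rfl, if_neg (by omega), if_pos (by omega)]
        omega
      · rw [if_neg hjm]
        have k1 := pv_key1 m j.toNat (by omega)
        have k2 := pv_key2 m j.toNat (by omega)
        split_ifs <;> omega
    · rw [pvUpdate, dif_neg hg]
      rw [if_neg (by omega)]
      omega

theorem query_eq (n : Int) (bit : Array Int) (P : List Int)
    (hs : bit.size = n.toNat)
    (hP : ∀ x ∈ P, 1 ≤ x ∧ x ≤ n - 1)
    (hb : ∀ m : ℕ, 0 < m → m < n.toNat →
      bit.getD m 0 = (cIoc P ((m - lsbN m : ℕ) : Int) (m : Int) : Int)) :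
    ∀ (K : ℕ) (i : Int), i.toNat ≤ K → 0 ≤ i → i < n → pvQuery bit i = (cLe P i : Int) := by
  intro K
  induction K with
  | zero =>
    intro i hK h0 _
    have hi : i = 0 := by omega
    subst hi
    rw [pvQuery, dif_neg (by omega)]
    have hnil : P.filter (fun x => decide (x ≤ (0:Int))) = [] :=
      List.filter_eq_nil_iff.mpr (fun x hx => by have := hP x hx; simp; omega)
    simp [cLe, hnil]
  | succ K ih =>
    intro i hK h0 hn
    by_cases hip : 0 < i
    · rw [pvQuery, dif_pos hip]
      have hm0 : 0 < i.toNat := by omega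
      have hmn : i.toNat < n.toNat := by omega
      have hL1 := lsbN_pos i.toNat hm0
      have hL2 := lsbN_le i.toNat
      have hband := band_eq_lsbN i hip
      have hcast : i - PySem.Int.band i (-i) = ((i.toNat - lsbN i.toNat : ℕ) : Int) := by
        rw [hband]; omega
      have hrec := ih (i - PySem.Int.band i (-i)) (by rw [hband]; omega)
        (by rw [hband]; omega) (by rw [hband]; omega)
      rw [hcast] at hrec
      rw [hcast, hrec, hb i.toNat hm0 hmn]
      have hi : ((i.toNat : ℕ) : Int) = i := by omega
      rw [hi]
      have hsplit := cnt_split P ((i.toNat - lsbN i.toNat : ℕ) : Int) ((i.toNat : ℕ) : Int) (by omega)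
      rw [hi] at hsplit
      omega
    · rw [pvQuery, dif_neg hip]
      have hi : i = 0 := by omega
      subst hi
      have hnil : P.filter (fun x => decide (x ≤ (0:Int))) = [] :=
        List.filter_eq_nil_iff.mpr (fun x hx => by have := hP x hx; simp; omega)
      simp [cLe, hnil]

theorem update_BitInv (n j : Int) (bit : Array Int) (P : List Int)
    (h : BitInv n bit P) (h1 : 1 ≤ j) (h2 : j ≤ n - 1) :
    BitInv n (pvUpdate n bit j) (P ++ [j]) := by
  obtain ⟨hs, hPb, hptw⟩ := h
  refine ⟨by rw [update_size]; exact hs, ?_, ?_⟩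
  · intro x hx
    rcases List.mem_append.mp hx with hx | hx
    · exact hPb x hx
    · simp at hx
      subst hx
      exact ⟨h1, h2⟩
  · intro m hm0 hmn
    rw [update_getD n ((n - j).toNat) j bit (le_refl _) (by omega) hs m hmn,
      hptw m hm0 hmn, cIoc_append]
    have hcond : (((m - lsbN m : ℕ) : Int) < j ∧ j ≤ (m : Int)) ↔ (j.toNat ≤ m ∧ m - lsbN m < j.toNat) := by
      omega
    by_cases hc : j.toNat ≤ m ∧ m - lsbN m < j.toNat
    · rw [if_pos hc, if_pos (hcond.mpr hc)]
      push_cast; ring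
    · rw [if_neg hc, if_neg (fun hh => hc (hcond.mp hh))]
      push_cast; ring

theorem filter_le_gt_split (seen : List Int) (num : Int) :
    (seen.filter (fun x => decide (x ≤ num))).length
      + (seen.filter (fun x => decide (num < x))).length = seen.length := by
  induction seen with
  | nil => simp
  | cons x t ih =>
    simp only [List.filter_cons]
    by_cases h : x ≤ num
    · have h2 : ¬ num < x := by omega
      simp [h, h2]; omega
    · have h2 : num < x := by omega
      simp [h, h2]; omega

theorem fold_eq (minv maxv : Int) :
    ∀ (rest seen : List Int) (c : Int) (bit : Array Int),
    BitInv (maxv - minv + 2) bit (seen.map (fun x => x - (minv - 1))) →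
    (∀ x ∈ rest, minv ≤ x ∧ x ≤ maxv) →
    (rest.foldl (pvStepA (minv - 1) (maxv - minv + 2)) (c, bit)).1
      = (rest.foldl pvStepB (c, seen)).1 := by
  intro rest
  induction rest with
  | nil => intro seen c bit _ _; rfl
  | cons num rest ih =>
    intro seen c bit hInv hbound
    obtain ⟨hs, hPb, hptw⟩ := hInv
    have hnum := hbound num (List.mem_cons_self ..)
    have hq1 := query_eq (maxv - minv + 2) bit (seen.map (fun x => x - (minv - 1))) hs hPb hptw
      ((num - (minv - 1) - 1).toNat) (num - (minv - 1) - 1) (le_refl _) (by omega) (by omega)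
    have hq2 := query_eq (maxv - minv + 2) bit (seen.map (fun x => x - (minv - 1))) hs hPb hptw
      ((num - (minv - 1)).toNat) (num - (minv - 1)) (le_refl _) (by omega) (by omega)
    have hq3 := query_eq (maxv - minv + 2) bit (seen.map (fun x => x - (minv - 1))) hs hPb hptw
      ((maxv - minv + 2 - 1).toNat) (maxv - minv + 2 - 1) (le_refl _) (by omega) (by omega)
    have e1 : cLe (seen.map (fun x => x - (minv - 1))) (num - (minv - 1) - 1)
        = (seen.filter (fun x => decide (x < num))).length := by
      unfold cLe
      rw [List.filter_map, List.length_map]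
      congr 1
      apply List.filter_congr
      intro x _
      simp only [Function.comp_apply, decide_eq_decide]
      omega
    have e2 : cLe (seen.map (fun x => x - (minv - 1))) (num - (minv - 1))
        = (seen.filter (fun x => decide (x ≤ num))).length := by
      unfold cLe
      rw [List.filter_map, List.length_map]
      congr 1
      apply List.filter_congr
      intro x _
      simp only [Function.comp_apply, decide_eq_decide]
      omega
    have e3 : cLe (seen.map (fun x => x - (minv - 1))) (maxv - minv + 2 - 1)
        = seen.length := by
      unfold cLe
      rw [List.filter_eq_self.mpr (fun x hx => by have := hPb x hx; simp; omega)]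
      rw [List.length_map]
    have e4 := filter_le_gt_split seen num
    simp only [List.foldl_cons]
    have hstep : pvStepA (minv - 1) (maxv - minv + 2) (c, bit) num
        = (c + min ((seen.filter (fun x => decide (x < num))).length : Int)
                  ((seen.filter (fun x => decide (num < x))).length : Int),
           pvUpdate (maxv - minv + 2) bit (num - (minv - 1))) := by
      unfold pvStepA
      simp only
      rw [hq1, hq2, hq3]
      have hmin2 : ((cLe (seen.map (fun x => x - (minv - 1))) (maxv - minv + 2 - 1) : ℕ) : Int)
            - ((cLe (seen.map (fun x => x - (minv - 1))) (num - (minv - 1)) : ℕ) : Int)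
          = ((seen.filter (fun x => decide (num < x))).length : Int) := by
        rw [e2, e3]; omega
      rw [hmin2, e1]
    rw [hstep]
    have hB : (seen ++ [num]).map (fun x => x - (minv - 1))
        = seen.map (fun x => x - (minv - 1)) ++ [num - (minv - 1)] := by
      simp
    have hInv' := update_BitInv (maxv - minv + 2) (num - (minv - 1)) bit
      (seen.map (fun x => x - (minv - 1))) ⟨hs, hPb, hptw⟩ (by omega) (by omega)
    have := ih (seen ++ [num])
      (c + min ((seen.filter (fun x => decide (x < num))).length : Int)
              ((seen.filter (fun x => decide (num < x))).length : Int))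
      (pvUpdate (maxv - minv + 2) bit (num - (minv - 1)))
      (by rw [hB]; exact hInv')
      (fun x hx => hbound x (List.mem_cons_of_mem _ hx))
    exact this

-- ===== VERDICT (by name: the statement is the Claim_ definition above) =====
theorem initial_BitInv (n : Int) :
    BitInv n (Array.replicate n.toNat 0) ([] : List Int) := by
  refine ⟨by simp, by simp, ?_⟩
  intro m hm0 hmn
  rw [Array.getD_eq_getD_getElem?]
  simp [hmn, cIoc]

theorem createSortedArray_spec : Claim_equal_createSortedArray := by
  unfold Claim_equal_createSortedArray
  intro l _ hpre
  unfold Spec_createSortedArray createSortedArray createSortedArray_alt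
  cases hmin : PySem.List.min? l (fun x => x) with
  | none => exact absurd ((PySem.List.min?_eq_none_iff l _).mp hmin) hpre
  | some minv =>
    cases hmax : PySem.List.max? l (fun x => x) with
    | none => exact absurd ((PySem.List.max?_eq_none_iff l _).mp hmax) hpre
    | some maxv =>
      simp only
      congr 1
      have hminv : ∀ x ∈ l, minv ≤ x := fun x hx => PySem.List.min?_isMin hmin x hx
      have hmaxv : ∀ x ∈ l, x ≤ maxv := fun x hx => PySem.List.max?_isMax hmax x hx
      exact fold_eq minv maxv l [] 0 (Array.replicate (maxv - minv + 2).toNat 0)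
        (by simpa using initial_BitInv (maxv - minv + 2))
        (fun x hx => ⟨hminv x hx, hmaxv x hx⟩)
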